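-- pv_equiv track=rewrite | github.com/taskrabbit/py_localizer | src/processors/basic_processor.py | vote_on_type
-- ===== SOURCE A (Python) =====
-- def vote_on_type(votes):
-- 	final_vote = "UNKNOWN"
-- 	for vote in votes:
-- 		if vote in ["int", "float"]:
-- 			if final_vote in ["UNKNOWN", "number"]:
-- 				final_vote = "config_number"
-- 		elif vote in ["list", "object"]:
-- 			final_vote = "complex"
-- 		elif vote in ["string"]:
-- 			if final_vote in ["UNKNOWN", "number", "string"]:
-- 				final_vote = "string"
-- 		elif vote in ["config_string"]:
-- 			if final_vote in ["UNKNOWN", "config_string"]: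
-- 				final_vote = "config_string"
--
-- 	return final_vote
-- ===== SOURCE B (Python) =====
-- def vote_on_type(votes):
-- 	if any(v in ("list", "object") for v in votes):
-- 		return "complex"
-- 	for v in votes:
-- 		if v in ("int", "float"):
-- 			return "config_number"
-- 		if v == "string":
-- 			return "string"
-- 		if v == "config_string":
-- 			return "config_string"
-- 	return "UNKNOWN"
-- ===== Notes on version B (the rewrite author's own statement) =====
-- stated objective: simpler
-- what changed: Replaces the running state-machine variable with a priority check (any list/object vote means complex) followed by a first-categorized-vote scan with early return, exploiting that all non-complex states are absorbing.
import Mathlib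
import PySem

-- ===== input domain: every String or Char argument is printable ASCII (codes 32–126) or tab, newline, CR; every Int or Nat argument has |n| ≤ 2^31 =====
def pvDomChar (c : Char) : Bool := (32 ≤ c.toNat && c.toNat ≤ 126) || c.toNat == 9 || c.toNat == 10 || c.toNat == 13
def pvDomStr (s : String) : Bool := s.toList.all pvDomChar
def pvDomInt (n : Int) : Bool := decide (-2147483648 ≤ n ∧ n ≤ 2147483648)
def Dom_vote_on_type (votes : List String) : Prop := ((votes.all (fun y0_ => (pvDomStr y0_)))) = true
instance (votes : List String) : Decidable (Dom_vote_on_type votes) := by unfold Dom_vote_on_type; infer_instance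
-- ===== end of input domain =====

-- B replaces A's running state-machine variable with a priority check for "complex"
-- plus a first-categorized-vote scan (objective: simpler).


-- ===== PORT A =====
-- loop body of A: one transition of the state machine
def voteStep (fv : String) (vote : String) : String :=
  if vote = "int" ∨ vote = "float" then
    (if fv = "UNKNOWN" ∨ fv = "number" then "config_number" else fv)
  else if vote = "list" ∨ vote = "object" then "complex"
  else if vote = "string" then
    (if fv = "UNKNOWN" ∨ fv = "number" ∨ fv = "string" then "string" else fv)
  else if vote = "config_string" then
    (if fv = "UNKNOWN" ∨ fv = "config_string" then "config_string" else fv)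
  else fv

def vote_on_type (votes : List String) : String :=
  votes.foldl voteStep "UNKNOWN"

-- ===== PORT B =====
-- first-categorized-vote scan of Source B
def firstCat : List String → String
  | [] => "UNKNOWN"
  | v :: rest =>
    if v = "int" ∨ v = "float" then "config_number"
    else if v = "string" then "string"
    else if v = "config_string" then "config_string"
    else firstCat rest

def vote_on_type_alt (votes : List String) : String :=
  if votes.any (fun v => v == "list" || v == "object") then "complex"
  else firstCat votes

-- ===== PRECONDITION & SPEC =====
def Spec_vote_on_type (votes : List String) (out : String) : Prop := out = vote_on_type_alt votes
instance (votes : List String) (out : String) : Decidable (Spec_vote_on_type votes out) := by unfold Spec_vote_on_type; infer_instance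

-- ===== CLAIM (what is proved, stated in full; the proofs are below) =====
def Claim_equal_vote_on_type : Prop := ∀ (votes : List String), Dom_vote_on_type votes → Spec_vote_on_type votes (vote_on_type votes)

-- ===== LEMMAS AND PROOFS =====

-- "complex" is absorbing in A's state machine
theorem foldl_complex (votes : List String) :
    votes.foldl voteStep "complex" = "complex" := by
  induction votes with
  | nil => rfl
  | cons v rest ih =>
    simp only [List.foldl]
    have : voteStep "complex" v = "complex" := by
      unfold voteStep; split_ifs <;> simp_all
    rw [this, ih]

-- the three non-complex categorized states are absorbing except for list/object votes
theorem foldl_sticky (votes : List String) (s : String)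
    (hs : s = "config_number" ∨ s = "string" ∨ s = "config_string") :
    votes.foldl voteStep s =
      (if votes.any (fun v => v == "list" || v == "object") then "complex" else s) := by
  induction votes with
  | nil => rfl
  | cons v rest ih =>
    simp only [List.foldl, List.any_cons]
    by_cases hv : v = "list" ∨ v = "object"
    · have h1 : voteStep s v = "complex" := by
        unfold voteStep; rcases hs with h | h | h <;> rcases hv with h' | h' <;> subst h h' <;> rfl
      have h2 : (v == "list" || v == "object") = true := by
        rcases hv with h' | h' <;> simp [h']
      rw [h1, foldl_complex]
      simp [h2]
    · have h1 : voteStep s v = s := by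
        unfold voteStep
        rcases hs with h | h | h <;> subst h <;> split_ifs <;> simp_all
      have h2 : (v == "list" || v == "object") = false := by
        simp only [Bool.or_eq_false_iff, beq_eq_false_iff_ne]
        exact ⟨fun h => hv (Or.inl h), fun h => hv (Or.inr h)⟩
      rw [h1, ih]
      simp [h2]

theorem foldl_unknown (votes : List String) :
    votes.foldl voteStep "UNKNOWN" =
      (if votes.any (fun v => v == "list" || v == "object") then "complex"
       else firstCat votes) := by
  induction votes with
  | nil => rfl
  | cons v rest ih =>
    simp only [List.foldl, List.any_cons, firstCat]
    by_cases h1 : v = "int" ∨ v = "float"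
    · have hs : voteStep "UNKNOWN" v = "config_number" := by
        unfold voteStep; rcases h1 with h | h <;> subst h <;> rfl
      have hlo : (v == "list" || v == "object") = false := by
        rcases h1 with h | h <;> subst h <;> rfl
      rw [hs, foldl_sticky rest _ (Or.inl rfl)]
      simp [hlo, h1]
    · by_cases h2 : v = "list" ∨ v = "object"
      · have hs : voteStep "UNKNOWN" v = "complex" := by
          unfold voteStep; rcases h2 with h | h <;> subst h <;> rfl
        have hlo : (v == "list" || v == "object") = true := by
          rcases h2 with h | h <;> simp [h]
        rw [hs, foldl_complex]
        simp [hlo]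
      · have hlo : (v == "list" || v == "object") = false := by
          simp only [Bool.or_eq_false_iff, beq_eq_false_iff_ne]
          exact ⟨fun h => h2 (Or.inl h), fun h => h2 (Or.inr h)⟩
        by_cases h3 : v = "string"
        · have hs : voteStep "UNKNOWN" v = "string" := by
            unfold voteStep; subst h3; rfl
          rw [hs, foldl_sticky rest _ (Or.inr (Or.inl rfl))]
          simp [hlo, h1, h3]
        · by_cases h4 : v = "config_string"
          · have hs : voteStep "UNKNOWN" v = "config_string" := by
              unfold voteStep; subst h4; rfl
            rw [hs, foldl_sticky rest _ (Or.inr (Or.inr rfl))]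
            simp [hlo, h1, h3, h4]
          · have hs : voteStep "UNKNOWN" v = "UNKNOWN" := by
              unfold voteStep; split_ifs <;> simp_all
            rw [hs, ih]
            simp [hlo, h1, h3, h4]

-- ===== VERDICT (by name: the statement is the Claim_ definition above) =====
theorem vote_on_type_spec : Claim_equal_vote_on_type := by
  intro votes _
  unfold Spec_vote_on_type vote_on_type vote_on_type_alt
  exact foldl_unknown votes
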